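-- pv_equiv track=rewrite | github.com/mvarukha/nsuprog | practicum12.py | find_char_with_three_occurrences
-- ===== SOURCE A (Python) =====
-- def find_char_with_three_occurrences(text):
--     char_count = {}
--
--     for char in text:
--         if char in char_count:
--             char_count[char] += 1
--         else:
--             char_count[char] = 1
--
--     for char, count in char_count.items():
--         if count == 3:
--             return char
--
--     return None
-- ===== SOURCE B (Python) =====
-- def find_char_with_three_occurrences(text):
--     if not text:
--         return None
--     ch = text[0]
--     if text.count(ch) == 3:
--         return ch
--     return find_char_with_three_occurrences(''.join(c for c in text if c != ch))
-- ===== Notes on version B (the rewrite author's own statement) =====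
-- stated objective: alternative
-- what changed: B replaces A's per-character dict-counting loop plus items scan by a recursive removal algorithm: count the first character with str.count, return it if its count is 3, otherwise delete every occurrence and recurse; correct because deleting a character leaves other counts and first-appearance order unchanged.
import Mathlib
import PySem

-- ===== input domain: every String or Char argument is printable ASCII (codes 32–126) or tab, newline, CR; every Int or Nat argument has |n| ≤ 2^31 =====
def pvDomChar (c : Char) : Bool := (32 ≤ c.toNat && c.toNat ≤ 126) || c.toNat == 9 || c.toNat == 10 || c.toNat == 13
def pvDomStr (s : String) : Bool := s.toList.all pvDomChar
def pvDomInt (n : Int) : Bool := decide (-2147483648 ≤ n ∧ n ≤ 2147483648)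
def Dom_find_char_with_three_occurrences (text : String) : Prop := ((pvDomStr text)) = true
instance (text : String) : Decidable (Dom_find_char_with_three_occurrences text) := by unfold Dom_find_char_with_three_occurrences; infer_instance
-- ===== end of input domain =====

-- B replaces A's dict counting by recursive removal: count the first char, return it at count 3, else delete its occurrences and recurse (alternative algorithm, no dict).

-- ===== PORT A =====
def find_char_with_three_occurrences (text : String) : Option String :=
  let char_count : PySem.Dict Char Int :=
    text.toList.foldl (fun d c =>
      if d.contains c then d.modify c 0 (· + 1) else d.insert c 1) PySem.Dict.empty
  match char_count.items.find? (fun p => p.2 == 3) with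
  | some p => some (String.ofList [p.1])
  | none => none

-- ===== PORT B =====
-- ''.join(c for c in text if c != ch) is List.filter; text.count(ch) for one char is List.count (exact).
def pvAltGo : List Char → Option String
  | [] => none
  | c :: t =>
    if (c :: t).count c == 3 then some (String.ofList [c])
    else pvAltGo (List.filter (fun x => !(x == c)) (c :: t))
termination_by cs => cs.length
decreasing_by
  simp only [List.filter_cons, beq_self_eq_true, Bool.not_true, Bool.false_eq_true, if_false]
  exact Nat.lt_succ_of_le (List.length_filter_le _ _)

def find_char_with_three_occurrences_alt (text : String) : Option String :=
  pvAltGo text.toList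

-- ===== PRECONDITION & SPEC =====
def Spec_find_char_with_three_occurrences (text : String) (out : Option String) : Prop := out = find_char_with_three_occurrences_alt text
instance (text : String) (out : Option String) : Decidable (Spec_find_char_with_three_occurrences text out) := by unfold Spec_find_char_with_three_occurrences; infer_instance

-- ===== CLAIM (what is proved, stated in full; the proofs are below) =====
def Claim_equal_find_char_with_three_occurrences : Prop := ∀ (text : String), Dom_find_char_with_three_occurrences text → Spec_find_char_with_three_occurrences text (find_char_with_three_occurrences text)

-- ===== LEMMAS AND PROOFS =====

-- A's per-step update is Counter's step.
theorem pv_step_eq (d : PySem.Dict Char Int) (c : Char) :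
    (if d.contains c then d.modify c 0 (· + 1) else d.insert c 1) = d.modify c 0 (· + 1) := by
  by_cases h : d.contains c = true
  · simp [h]
  · have hg : d.getD c 0 = 0 := by
      rw [PySem.Dict.getD_of_not_contains] ; simpa using h
    simp [h, PySem.Dict.modify, hg]

theorem pv_find?_congr {α : Type} (p q : α → Bool) (l : List α)
    (h : ∀ x ∈ l, p x = q x) : l.find? p = l.find? q := by
  induction l with
  | nil => rfl
  | cons x l ih =>
    have hx := h x (List.mem_cons_self)
    cases hpx : q x with
    | true => simp [List.find?, hx, hpx]
    | false =>
      simp only [List.find?, hx, hpx]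
      exact ih (fun y hy => h y (List.mem_cons_of_mem _ hy))

-- find? over the first-occurrence dedup (foldl Set.add) agrees with find? over the list.
theorem pv_find?_foldl_add {α : Type} [BEq α] [LawfulBEq α] (p : α → Bool) :
    ∀ (xs acc : List α), ((xs.foldl PySem.Set.add acc).find? p) = ((acc.find? p).or (xs.find? p))
  | [], acc => by simp
  | x :: xs, acc => by
    simp only [List.foldl_cons]
    rw [pv_find?_foldl_add p xs]
    have hadd : (PySem.Set.add acc x).find? p = (acc.find? p).or (if p x then some x else none) := by
      by_cases hm : x ∈ acc
      · cases hfa : acc.find? p with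
        | some v => simp [PySem.Set.add, hm, hfa]
        | none =>
          have hpx : p x = false := by simpa using List.find?_eq_none.mp hfa x hm
          simp [PySem.Set.add, hm, hfa, hpx]
      · have hc : PySem.Set.contains acc x = false := by
          simp [PySem.Set.contains, hm]
        simp only [PySem.Set.add, hc, Bool.false_eq_true, if_false]
        rw [List.find?_append]
        cases hfa : acc.find? p <;> cases hpx : p x <;> simp [List.find?, hpx]
    rw [hadd]
    cases hfa : acc.find? p with
    | some v => simp
    | none => cases hpx : p x <;> simp [List.find?, hpx]

theorem pv_find?_ofList {α : Type} [BEq α] [LawfulBEq α] (p : α → Bool) (xs : List α) :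
    (PySem.Set.ofList xs).find? p = xs.find? p := by
  rw [PySem.Set.ofList_eq_foldl, pv_find?_foldl_add]
  simp

-- skipping elements on which q is false: find? over a filter that only drops q-false elements.
theorem pv_find?_filter {α : Type} (p q : α → Bool) :
    ∀ (l : List α), (∀ x ∈ l, p x = false → q x = false) →
      l.find? q = (l.filter p).find? q
  | [], _ => rfl
  | x :: l, h => by
    have ih := pv_find?_filter p q l (fun y hy => h y (List.mem_cons_of_mem _ hy))
    cases hpx : p x with
    | true =>
      cases hqx : q x <;> simp [hpx, List.find?, hqx, ih]
    | false =>
      have hqx : q x = false := h x (List.mem_cons_self) hpx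
      simp [hpx, List.find?, hqx, ih]

-- B's recursion computes the first character (in text order) whose total count is 3.
theorem pv_altGo_eq : ∀ (n : Nat) (cs : List Char), cs.length ≤ n →
    pvAltGo cs = (cs.find? (fun c => cs.count c == 3)).map (fun c => String.ofList [c])
  | 0, cs, h => by
    have : cs = [] := List.eq_nil_of_length_eq_zero (Nat.le_zero.mp h)
    subst this; simp [pvAltGo]
  | n + 1, [], _ => by simp [pvAltGo]
  | n + 1, c :: t, h => by
    rw [pvAltGo]
    cases h3 : ((c :: t).count c == 3) with
    | true =>
      rw [if_pos rfl, List.find?_cons_of_pos (p := fun d => (c :: t).count d == 3) h3]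
      rfl
    | false =>
      have h3n : ¬ ((c :: t).count c == 3) = true := by
        rw [h3]; exact Bool.false_ne_true
      rw [if_neg Bool.false_ne_true, List.find?_cons_of_neg (p := fun d => (c :: t).count d == 3) h3n]
      have hfc : List.filter (fun x => !(x == c)) (c :: t)
          = List.filter (fun x => !(x == c)) t := by
        simp
      have hlen : (List.filter (fun x => !(x == c)) t).length ≤ n := by
        have := List.length_filter_le (fun x => !(x == c)) t
        have ht : t.length ≤ n := by simpa using Nat.le_of_succ_le_succ h
        omega
      rw [hfc, pv_altGo_eq n _ hlen]
      -- counts of the surviving characters are unchanged by the filter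
      have hcnt : ∀ d : Char, d ≠ c →
          (List.filter (fun x => !(x == c)) t).count d = (c :: t).count d := by
        intro d hd
        have hpd : (fun x => !(x == c)) d = true := by simp [hd]
        rw [List.count_filter (p := fun x => !(x == c)) hpd]
        simp [Ne.symm hd]
      have hcongr : (List.filter (fun x => !(x == c)) t).find?
            (fun d => (List.filter (fun x => !(x == c)) t).count d == 3)
          = (List.filter (fun x => !(x == c)) t).find?
            (fun d => (c :: t).count d == 3) := by
        apply pv_find?_congr
        intro d hd
        have hdc : d ≠ c := by
          have := List.of_mem_filter hd
          simpa using this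
        rw [hcnt d hdc]
      have hskip : t.find? (fun d => (c :: t).count d == 3)
          = (List.filter (fun x => !(x == c)) t).find? (fun d => (c :: t).count d == 3) := by
        apply pv_find?_filter
        intro x _ hx
        have hxc : x = c := by simpa using hx
        subst hxc; simpa using h3
      rw [hcongr, ← hskip]

-- ===== VERDICT (by name: the statement is the Claim_ definition above) =====
theorem find_char_with_three_occurrences_spec : Claim_equal_find_char_with_three_occurrences := by
  intro text _
  unfold Spec_find_char_with_three_occurrences
  unfold find_char_with_three_occurrences find_char_with_three_occurrences_alt
  have hA : (text.toList.foldl (fun d c =>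
      if d.contains c then d.modify c 0 (· + 1) else d.insert c 1) PySem.Dict.empty)
      = PySem.Dict.counter text.toList := by
    rw [PySem.Dict.counter_eq_foldl]
    have : (fun (d : PySem.Dict Char Int) c =>
        if d.contains c then d.modify c 0 (· + 1) else d.insert c 1)
        = (fun d c => d.modify c 0 (· + 1)) := by
      funext d c; exact pv_step_eq d c
    rw [this]
  simp only [hA]
  rw [PySem.Dict.items_counter, List.find?_map]
  have hcomp : ((fun p : Char × Int => p.2 == 3) ∘ fun k => (k, (text.toList.count k : Int)))
      = fun k => ((text.toList.count k : Int) == 3) := rfl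
  rw [hcomp, pv_find?_ofList]
  have hq : text.toList.find? (fun c => ((text.toList.count c : Int)) == 3)
      = text.toList.find? (fun c => text.toList.count c == 3) := by
    apply pv_find?_congr; intro c _
    by_cases h : text.toList.count c = 3
    · simp [h]
    · have h' : (text.toList.count c : Int) ≠ 3 := by exact_mod_cast h
      simp [h, h']
  rw [hq, pv_altGo_eq text.toList.length text.toList (Nat.le_refl _)]
  cases h : text.toList.find? (fun c => text.toList.count c == 3) <;> simp
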